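-- pv_equiv track=rewrite | github.com/PhiDCH/DeepStream-Yolo | post_process_rack_2.py | find_same_col_klts
-- ===== SOURCE A (Python) =====
-- def find_same_col_klts(klts):
--     res = []
--     for i, klt in enumerate(klts):
--         for klt_j in klts[i:]:
--             if klt[0] <3 or klt_j[0] < 3:
--                 continue
--             if klt[0] == klt_j[0]:
--                 continue
--             if (klt[0] - klt_j[0])%9 == 0 :
--                 res.append([klt, klt_j])
--
--     return res
-- ===== SOURCE B (Python) =====
-- def find_same_col_klts(klts):
--     buckets = {}
--     for i, klt in enumerate(klts):
--         v = klt[0]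
--         if v >= 3:
--             buckets.setdefault(v % 9, []).append((i, v, klt))
--     res = []
--     for i, klt in enumerate(klts):
--         v = klt[0]
--         if v >= 3:
--             for j, w, klt_j in buckets[v % 9]:
--                 if j >= i and w != v:
--                     res.append([klt, klt_j])
--     return res
-- ===== Notes on version B (the rewrite author's own statement) =====
-- stated objective: alternative
-- what changed: Replaces the quadratic rescan of the list suffix for every element by a one-pass dict index bucketing eligible elements by value mod 9, then each element walks only its own residue bucket (filtering by index and unequal value) instead of the whole suffix.
import Mathlib
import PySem

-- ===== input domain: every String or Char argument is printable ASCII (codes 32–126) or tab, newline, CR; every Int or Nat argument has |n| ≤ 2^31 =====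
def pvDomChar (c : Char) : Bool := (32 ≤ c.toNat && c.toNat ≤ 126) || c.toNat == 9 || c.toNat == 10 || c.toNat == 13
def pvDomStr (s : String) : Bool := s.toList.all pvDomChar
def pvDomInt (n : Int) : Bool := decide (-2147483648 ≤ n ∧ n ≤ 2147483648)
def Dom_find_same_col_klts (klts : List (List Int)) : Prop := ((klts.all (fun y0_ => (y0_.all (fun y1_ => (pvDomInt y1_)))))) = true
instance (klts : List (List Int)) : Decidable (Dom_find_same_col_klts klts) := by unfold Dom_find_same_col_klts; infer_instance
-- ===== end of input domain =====

-- B replaces A's per-element suffix rescan by a one-pass residue-mod-9 bucket index; each element then walks only its own bucket (alternative algorithm, same worst-case cost).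


-- ===== PORT A =====
def find_same_col_klts (klts : List (List Int)) : List (List (List Int)) :=
  (PySem.List.enumerate klts 0).foldl (fun res p =>
    (PySem.List.slice klts (some p.1) none).foldl (fun res klt_j =>
      match PySem.List.pyGet? p.2 0 with
      | none => res        -- IndexError (excluded by Pre_)
      | some a =>
        if a < 3 then res  -- 'or' short-circuits: klt_j[0] not evaluated
        else
          match PySem.List.pyGet? klt_j 0 with
          | none => res    -- IndexError (excluded by Pre_)
          | some b =>
            if b < 3 then res
            else if a = b then res
            else if PySem.Int.mod (a - b) 9 = 0 then res ++ [[p.2, klt_j]]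
            else res) res) []

-- ===== PORT B =====
-- B's first pass: bucket (index, value, element) triples by value mod 9, eligible elements only
def pvBuckets (klts : List (List Int)) : PySem.Dict Int (List (Int × Int × List Int)) :=
  (PySem.List.enumerate klts 0).foldl (fun d p =>
    match PySem.List.pyGet? p.2 0 with
    | none => d            -- IndexError (excluded by Pre_)
    | some v =>
      if 3 ≤ v then
        PySem.Dict.modify d (PySem.Int.mod v 9) [] (· ++ [(p.1, v, p.2)])
      else d) (PySem.Dict.empty)

def find_same_col_klts_alt (klts : List (List Int)) : List (List (List Int)) :=
  (PySem.List.enumerate klts 0).foldl (fun res p =>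
    match PySem.List.pyGet? p.2 0 with
    | none => res          -- IndexError (excluded by Pre_)
    | some v =>
      if 3 ≤ v then
        (PySem.Dict.getD (pvBuckets klts) (PySem.Int.mod v 9) []).foldl (fun res q =>
          if p.1 ≤ q.1 ∧ q.2.1 ≠ v then res ++ [[p.2, q.2.2]] else res) res
      else res) []

-- ===== PRECONDITION & SPEC =====
-- Pre_ excludes lists containing an empty inner list, on which A raises IndexError (klt[0]).
def Pre_find_same_col_klts (klts : List (List Int)) : Prop := ∀ l ∈ klts, l ≠ []
instance (klts : List (List Int)) : Decidable (Pre_find_same_col_klts klts) := by unfold Pre_find_same_col_klts; infer_instance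
def pvWitness_find_same_col_klts : List (List Int) := [[3, 1], [12], [2], [4]]

def Spec_find_same_col_klts (klts : List (List Int)) (out : List (List (List Int))) : Prop := out = find_same_col_klts_alt klts
instance (klts : List (List Int)) (out : List (List (List Int))) : Decidable (Spec_find_same_col_klts klts out) := by unfold Spec_find_same_col_klts; infer_instance

-- ===== CLAIM (what is proved, stated in full; the proofs are below) =====
def Claim_equal_find_same_col_klts : Prop := ∀ (klts : List (List Int)), Dom_find_same_col_klts klts → Pre_find_same_col_klts klts → Spec_find_same_col_klts klts (find_same_col_klts klts)

-- ===== LEMMAS AND PROOFS =====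

-- head of an inner list (all inner lists are nonempty under Pre_)
def pvHd (l : List Int) : Int := l.headD 0

-- the common pair-selection predicate, in B's residue form
def pvP (v : Int) (kj : List Int) : Bool :=
  decide (3 ≤ pvHd kj) && (pvHd kj != v) && decide (PySem.Int.mod (pvHd kj) 9 = PySem.Int.mod v 9)

-- the per-outer-element contribution both ports produce
def pvF (klts : List (List Int)) (p : Int × List Int) : List (List (List Int)) :=
  if 3 ≤ pvHd p.2 then ((klts.drop p.1.toNat).filter (pvP (pvHd p.2))).map (fun kj => [p.2, kj]) else []

theorem pvGet0 (l : List Int) (h : l ≠ []) : PySem.List.pyGet? l 0 = some (pvHd l) := by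
  cases l with
  | nil => simp at h
  | cons x xs => simp [pvHd]

theorem pvModIff (v w : Int) :
    PySem.Int.mod (v - w) 9 = 0 ↔ PySem.Int.mod w 9 = PySem.Int.mod v 9 := by
  simp only [PySem.Int.mod_eq_emod_of_pos (show (0:Int) < 9 by norm_num)]
  omega

theorem pvEnumMem {α : Type} (xs : List α) (p : Int × α) (h : p ∈ PySem.List.enumerate xs 0) :
    0 ≤ p.1 ∧ p.2 ∈ xs := by
  rw [PySem.List.mem_enumerate_iff] at h
  obtain ⟨k, hk, rfl⟩ := h
  exact ⟨by simp, by simp [List.getElem_mem]⟩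

theorem pvEnumFilter {α : Type} (P : α → Bool) :
    ∀ (xs : List α) (s i : Int),
      (((PySem.List.enumerate xs s).filter (fun q => decide (i ≤ q.1) && P q.2)).map (fun q => q.2))
        = (xs.drop (i - s).toNat).filter P := by
  intro xs
  induction xs with
  | nil => intro s i; simp [PySem.List.enumerate_nil]
  | cons x xs ih =>
    intro s i
    rw [PySem.List.enumerate_cons]
    by_cases hi : i ≤ s
    · have h0 : (i - s).toNat = 0 := by omega
      have h1 : (i - (s + 1)).toNat = 0 := by omega
      have hxs := ih (s + 1) i
      rw [h1] at hxs
      simp only [List.filter_cons, List.drop_zero] at hxs ⊢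
      rw [h0]
      simp only [List.drop_zero]
      by_cases hP : P x
      · simp [hi, hP, hxs]
      · simp [hi, hP, hxs]
    · have h0 : (i - s).toNat = (i - (s + 1)).toNat + 1 := by omega
      have hxs := ih (s + 1) i
      simp only [List.filter_cons]
      rw [h0]
      simp [hi, hxs, List.drop_succ_cons]

theorem pvFoldlInnerA (klt : List Int) :
    ∀ (l : List (List Int)), (∀ kj ∈ l, kj ≠ []) → ∀ (res : List (List (List Int))),
      l.foldl (fun res klt_j =>
        if pvHd klt < 3 then res
        else
          match PySem.List.pyGet? klt_j 0 with
          | none => res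
          | some b =>
            if b < 3 then res
            else if pvHd klt = b then res
            else if PySem.Int.mod (pvHd klt - b) 9 = 0 then res ++ [[klt, klt_j]]
            else res) res
      = res ++ (if 3 ≤ pvHd klt then (l.filter (pvP (pvHd klt))).map (fun kj => [klt, kj]) else []) := by
  intro l
  induction l with
  | nil => intro _ res; simp
  | cons kj l ih =>
    intro hall res
    have hkj : kj ≠ [] := hall kj (by simp)
    have hall' : ∀ x ∈ l, x ≠ [] := fun x hx => hall x (by simp [hx])
    simp only [List.foldl_cons]
    rw [ih hall']
    rw [pvGet0 kj hkj]
    by_cases hv : 3 ≤ pvHd klt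
    · have hv' : ¬ (pvHd klt < 3) := by omega
      simp only [hv', if_false, if_pos hv, List.filter_cons]
      by_cases hb : pvHd kj < 3
      · have hPf : pvP (pvHd klt) kj = false := by
          simp only [pvP, Bool.and_eq_false_iff]
          left; left; simpa using (by omega : ¬ (3 ≤ pvHd kj))
        simp [hb, hPf]
      · by_cases heq : pvHd klt = pvHd kj
        · have hPf : pvP (pvHd klt) kj = false := by
            simp only [pvP, Bool.and_eq_false_iff]
            left; right; simp [heq]
          rw [heq] at hPf
          simp [hb, heq, hPf]
        · by_cases hm : PySem.Int.mod (pvHd klt - pvHd kj) 9 = 0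
          · have hPt : pvP (pvHd klt) kj = true := by
              simp only [pvP, Bool.and_eq_true, decide_eq_true_eq, bne_iff_ne]
              exact ⟨⟨by omega, fun h => heq h.symm⟩, (pvModIff _ _).mp hm⟩
            have hd9 : (9:Int) ∣ pvHd klt - pvHd kj := (PySem.Int.mod_eq_zero_iff_dvd _ _).mp hm
            simp [hb, heq, hd9, hPt]
          · have hPf : pvP (pvHd klt) kj = false := by
              simp only [pvP, Bool.and_eq_false_iff]
              right; simpa using fun h => hm ((pvModIff _ _).mpr h)
            have hd9 : ¬ (9:Int) ∣ pvHd klt - pvHd kj := fun h => hm ((PySem.Int.mod_eq_zero_iff_dvd _ _).mpr h)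
            simp [hb, heq, hd9, hPf]
    · have hv' : pvHd klt < 3 := by omega
      simp [hv', hv]

theorem pvBucketAux (r : Int) :
    ∀ (l : List (Int × List Int)), (∀ p ∈ l, p.2 ≠ []) →
      ∀ (d : PySem.Dict Int (List (Int × Int × List Int))),
      PySem.Dict.getD
        (l.foldl (fun d p =>
          match PySem.List.pyGet? p.2 0 with
          | none => d
          | some v =>
            if 3 ≤ v then
              PySem.Dict.modify d (PySem.Int.mod v 9) [] (· ++ [(p.1, v, p.2)])
            else d) d) r []
      = PySem.Dict.getD d r [] ++
          ((l.filter (fun q => decide (3 ≤ pvHd q.2) && decide (PySem.Int.mod (pvHd q.2) 9 = r))).map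
            (fun q => (q.1, pvHd q.2, q.2))) := by
  intro l
  induction l with
  | nil => intro _ d; simp
  | cons p l ih =>
    intro hall d
    have hp : p.2 ≠ [] := hall p (by simp)
    have hall' : ∀ x ∈ l, x.2 ≠ [] := fun x hx => hall x (by simp [hx])
    simp only [List.foldl_cons]
    rw [pvGet0 p.2 hp]
    simp only [List.filter_cons]
    by_cases h3 : 3 ≤ pvHd p.2
    · by_cases hr : PySem.Int.mod (pvHd p.2) 9 = r
      · simp only [if_pos h3]
        rw [ih hall']
        rw [PySem.Dict.getD_modify]
        simp only [PySem.Int.mod_eq_emod_of_pos (show (0:Int) < 9 by norm_num)] at hr ⊢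
        simp [hr, h3, List.append_assoc]
      · simp only [if_pos h3]
        rw [ih hall']
        rw [PySem.Dict.getD_modify]
        simp only [PySem.Int.mod_eq_emod_of_pos (show (0:Int) < 9 by norm_num)] at hr ⊢
        rw [if_neg (fun h => hr h.symm)]
        simp [hr]
    · simp only [if_neg h3]
      rw [ih hall']
      simp [h3]

theorem pvBucketsEq (klts : List (List Int)) (hpre : ∀ l ∈ klts, l ≠ []) (r : Int) :
    PySem.Dict.getD (pvBuckets klts) r []
    = (((PySem.List.enumerate klts 0).filter
          (fun q => decide (3 ≤ pvHd q.2) && decide (PySem.Int.mod (pvHd q.2) 9 = r))).map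
        (fun q => (q.1, pvHd q.2, q.2))) := by
  unfold pvBuckets
  rw [pvBucketAux r (PySem.List.enumerate klts 0)
        (fun p hp => hpre p.2 (pvEnumMem klts p hp).2)]
  simp

theorem pvFoldlInnerB (klts : List (List Int))
    (p : Int × List Int) (hv : 3 ≤ pvHd p.2) :
    ∀ (res : List (List (List Int))),
      ((((PySem.List.enumerate klts 0).filter
          (fun q => decide (3 ≤ pvHd q.2) && decide (PySem.Int.mod (pvHd q.2) 9 = PySem.Int.mod (pvHd p.2) 9))).map
        (fun q => (q.1, pvHd q.2, q.2))).foldl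
        (fun res q => if p.1 ≤ q.1 ∧ q.2.1 ≠ pvHd p.2 then res ++ [[p.2, q.2.2]] else res) res)
      = res ++ pvF klts p := by
  intro res
  rw [PySem.List.foldl_append_ite (fun q : Int × Int × List Int => p.1 ≤ q.1 ∧ q.2.1 ≠ pvHd p.2)
        (fun q : Int × Int × List Int => [p.2, q.2.2])]
  congr 1
  rw [List.filter_map, List.map_map, List.filter_filter]
  rw [pvF, if_pos hv]
  simp only [Function.comp]
  have hfc : ∀ q ∈ PySem.List.enumerate klts 0,
      (decide (p.1 ≤ q.1 ∧ pvHd q.2 ≠ pvHd p.2) &&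
        (decide (3 ≤ pvHd q.2) && decide (PySem.Int.mod (pvHd q.2) 9 = PySem.Int.mod (pvHd p.2) 9)))
      = (decide (p.1 ≤ q.1) && pvP (pvHd p.2) q.2) := by
    intro q _
    simp only [pvP]
    by_cases h1 : p.1 ≤ q.1 <;> by_cases h2 : 3 ≤ pvHd q.2 <;>
      by_cases h3 : PySem.Int.mod (pvHd q.2) 9 = PySem.Int.mod (pvHd p.2) 9 <;>
      by_cases h4 : pvHd q.2 = pvHd p.2 <;>
      first
        | simp [h1, h2, h3, h4]
        | simp [h1, h2, h4]
        | simp [h1, h2]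
        | simp [h1]
  rw [List.filter_congr hfc]
  have hef := pvEnumFilter (pvP (pvHd p.2)) klts 0 p.1
  simp only [sub_zero] at hef
  rw [← hef, List.map_map]
  simp [Function.comp]

-- ===== VERDICT (by name: the statement is the Claim_ definition above) =====
theorem find_same_col_klts_spec : Claim_equal_find_same_col_klts := by
  intro klts _ hpre
  unfold Spec_find_same_col_klts find_same_col_klts find_same_col_klts_alt
  have hA : ∀ (acc : List (List (List Int))) (p : Int × List Int),
      p ∈ PySem.List.enumerate klts 0 →
      ((PySem.List.slice klts (some p.1) none).foldl (fun res klt_j =>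
        match PySem.List.pyGet? p.2 0 with
        | none => res
        | some a =>
          if a < 3 then res
          else
            match PySem.List.pyGet? klt_j 0 with
            | none => res
            | some b =>
              if b < 3 then res
              else if a = b then res
              else if PySem.Int.mod (a - b) 9 = 0 then res ++ [[p.2, klt_j]]
              else res) acc)
      = acc ++ pvF klts p := by
    intro acc p hp
    obtain ⟨h0, hmem⟩ := pvEnumMem klts p hp
    rw [PySem.List.slice_from klts h0]
    simp only [pvGet0 p.2 (hpre p.2 hmem)]
    exact pvFoldlInnerA p.2 (klts.drop p.1.toNat)
          (fun kj hkj => hpre kj (List.mem_of_mem_drop hkj)) acc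
  have hB : ∀ (acc : List (List (List Int))) (p : Int × List Int),
      p ∈ PySem.List.enumerate klts 0 →
      (match PySem.List.pyGet? p.2 0 with
       | none => acc
       | some v =>
         if 3 ≤ v then
           (PySem.Dict.getD (pvBuckets klts) (PySem.Int.mod v 9) []).foldl (fun res q =>
             if p.1 ≤ q.1 ∧ q.2.1 ≠ v then res ++ [[p.2, q.2.2]] else res) acc
         else acc)
      = acc ++ pvF klts p := by
    intro acc p hp
    obtain ⟨h0, hmem⟩ := pvEnumMem klts p hp
    rw [pvGet0 p.2 (hpre p.2 hmem)]
    simp only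
    by_cases hv : 3 ≤ pvHd p.2
    · rw [if_pos hv, pvBucketsEq klts hpre (PySem.Int.mod (pvHd p.2) 9)]
      exact pvFoldlInnerB klts p hv acc
    · rw [if_neg hv]
      simp [pvF, hv]
  exact (PySem.List.foldl_congr_mem _ _ _ _ hA).trans (PySem.List.foldl_congr_mem _ _ _ _ hB).symm
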